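-- pv_equiv track=rewrite | github.com/pypi-data/pypi-mirror-276 | packages/qualystbx/qualystbx-0.38.0-py3-none-any.whl/qualys_tbx/qtbx_lib/qtbx_lib_authentication.py | get_platform_identification_with_fqdn
-- ===== SOURCE A (Python) =====
-- def get_platform_identifier_dict(): # Update here whenever platform identification changes.
--     platform_identifier_dict = {}
--     platform_identifier_dict['_'] = {'qualysapi': 'qualysapi.qualys.com', 'gateway':'gateway.qg1.apps.qualys.com', 'pod': 'US_01'}
--     platform_identifier_dict['2'] = {'qualysapi': 'qualysapi.qg2.apps.qualys.com','gateway': 'gateway.qg2.apps.qualys.com', 'pod': 'US_02'}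
--     platform_identifier_dict['3'] = {'qualysapi': 'qualysapi.qg3.apps.qualys.com','gateway': 'gateway.qg3.apps.qualys.com', 'pod': 'US_03'}
--     platform_identifier_dict['6'] = {'qualysapi': 'qualysapi.qg4.apps.qualys.com','gateway': 'gateway.qg4.apps.qualys.com', 'pod': 'US_04'}
--     platform_identifier_dict['-'] = {'qualysapi': 'qualysapi.qualys.eu','gateway': 'gateway.qg1.apps.qualys.eu', 'pod': 'EU_01'}
--     platform_identifier_dict['5'] = {'qualysapi': 'qualysapi.qg2.apps.qualys.eu','gateway': 'gateway.qg2.apps.qualys.eu', 'pod': 'EU_02'}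
--     platform_identifier_dict['!'] = {'qualysapi': 'qualysapi.qg2.apps.qualys.eu','gateway': 'gateway.qg2.apps.qualys.eu', 'pod': 'EU_02'}
--     platform_identifier_dict['B'] = {'qualysapi': 'qualysapi.qg3.apps.qualys.it','gateway': 'gateway.qg3.apps.qualys.it', 'pod': 'EU_03'}
--     platform_identifier_dict['8'] = {'qualysapi': 'qualysapi.qg1.apps.qualys.in','gateway': 'gateway.qg1.apps.qualys.in', 'pod': 'IN_01'}
--     platform_identifier_dict['9'] = {'qualysapi': 'qualysapi.qg1.apps.qualys.ca','gateway': 'gateway.qg1.apps.qualys.ca', 'pod': 'CA_01'}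
--     platform_identifier_dict['7'] = {'qualysapi': 'qualysapi.qg1.apps.qualys.ae','gateway': 'gateway.qg1.apps.qualys.eu', 'pod': 'AE_01'}
--     platform_identifier_dict['1'] = {'qualysapi': 'qualysapi.qg1.apps.qualys.co.uk','gateway': 'gateway.qg1.apps.qualys.co.uk', 'pod': 'UK_01'}
--     platform_identifier_dict['4'] = {'qualysapi': 'qualysapi.qg1.apps.qualys.com.au','gateway': 'gateway.qg1.apps.qualys.com.au', 'pod': 'AU_01'}
--     platform_identifier_dict['A'] = {'qualysapi': 'qualysapi.qg1.apps.qualysksa.com','gateway': 'gateway.qg1.apps.qualysksa.com', 'pod': 'KSA_01'}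
--     return platform_identifier_dict
--
-- def get_platform_identification_with_fqdn(fqdn=""):
--     qualys_fqdn = fqdn.strip()  # Remove any leading/trailing whitespace
--     platform_identifier_dict = get_platform_identifier_dict()
--     for key in platform_identifier_dict:
--         platform_qualysapi_fqdn = platform_identifier_dict[key]['qualysapi']
--         platform_gateway_fqdn = platform_identifier_dict[key]['gateway']
--         if qualys_fqdn == platform_qualysapi_fqdn:
--             return platform_identifier_dict[key]
--         elif qualys_fqdn == platform_gateway_fqdn:
--             return platform_identifier_dict[key]
--     return None
-- ===== SOURCE B (Python) =====
-- _PLATFORMS = [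
--     {'qualysapi': 'qualysapi.qualys.com', 'gateway': 'gateway.qg1.apps.qualys.com', 'pod': 'US_01'},
--     {'qualysapi': 'qualysapi.qg2.apps.qualys.com', 'gateway': 'gateway.qg2.apps.qualys.com', 'pod': 'US_02'},
--     {'qualysapi': 'qualysapi.qg3.apps.qualys.com', 'gateway': 'gateway.qg3.apps.qualys.com', 'pod': 'US_03'},
--     {'qualysapi': 'qualysapi.qg4.apps.qualys.com', 'gateway': 'gateway.qg4.apps.qualys.com', 'pod': 'US_04'},
--     {'qualysapi': 'qualysapi.qualys.eu', 'gateway': 'gateway.qg1.apps.qualys.eu', 'pod': 'EU_01'},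
--     {'qualysapi': 'qualysapi.qg2.apps.qualys.eu', 'gateway': 'gateway.qg2.apps.qualys.eu', 'pod': 'EU_02'},
--     {'qualysapi': 'qualysapi.qg2.apps.qualys.eu', 'gateway': 'gateway.qg2.apps.qualys.eu', 'pod': 'EU_02'},
--     {'qualysapi': 'qualysapi.qg3.apps.qualys.it', 'gateway': 'gateway.qg3.apps.qualys.it', 'pod': 'EU_03'},
--     {'qualysapi': 'qualysapi.qg1.apps.qualys.in', 'gateway': 'gateway.qg1.apps.qualys.in', 'pod': 'IN_01'},
--     {'qualysapi': 'qualysapi.qg1.apps.qualys.ca', 'gateway': 'gateway.qg1.apps.qualys.ca', 'pod': 'CA_01'},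
--     {'qualysapi': 'qualysapi.qg1.apps.qualys.ae', 'gateway': 'gateway.qg1.apps.qualys.eu', 'pod': 'AE_01'},
--     {'qualysapi': 'qualysapi.qg1.apps.qualys.co.uk', 'gateway': 'gateway.qg1.apps.qualys.co.uk', 'pod': 'UK_01'},
--     {'qualysapi': 'qualysapi.qg1.apps.qualys.com.au', 'gateway': 'gateway.qg1.apps.qualys.com.au', 'pod': 'AU_01'},
--     {'qualysapi': 'qualysapi.qg1.apps.qualysksa.com', 'gateway': 'gateway.qg1.apps.qualysksa.com', 'pod': 'KSA_01'},
-- ]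
--
-- # Reverse-lookup index built once: earlier entries win ties, qualysapi before gateway.
-- _INDEX = {}
-- for _entry in _PLATFORMS:
--     _INDEX.setdefault(_entry['qualysapi'], _entry)
--     _INDEX.setdefault(_entry['gateway'], _entry)
--
-- def get_platform_identification_with_fqdn(fqdn=""):
--     return _INDEX.get(fqdn.strip())
-- ===== Notes on version B (the rewrite author's own statement) =====
-- stated objective: simpler
-- what changed: The per-call scan over all platform entries (comparing each entry's qualysapi then gateway) is replaced by a module-level reverse-lookup dict built once with setdefault (qualysapi before gateway, earlier entries winning ties), so each call is a single strip plus one dict lookup.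
import Mathlib
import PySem

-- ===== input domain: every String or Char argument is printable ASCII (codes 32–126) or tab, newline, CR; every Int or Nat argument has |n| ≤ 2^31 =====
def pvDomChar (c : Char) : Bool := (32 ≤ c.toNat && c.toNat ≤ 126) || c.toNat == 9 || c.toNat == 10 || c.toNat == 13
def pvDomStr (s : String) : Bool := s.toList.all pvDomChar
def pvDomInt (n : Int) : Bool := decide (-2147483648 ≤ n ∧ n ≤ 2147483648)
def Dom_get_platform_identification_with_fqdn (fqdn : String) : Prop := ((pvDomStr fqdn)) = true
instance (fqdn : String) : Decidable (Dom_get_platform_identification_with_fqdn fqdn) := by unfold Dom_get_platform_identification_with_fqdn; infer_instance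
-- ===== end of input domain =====

-- B replaces A's per-call scan over the platform entries with a reverse-lookup dict
-- built once via setdefault, so a call is one strip plus one dict lookup (objective: simpler).


-- ===== PORT A =====
-- an inner platform dict {'qualysapi': q, 'gateway': g, 'pod': p}
def pvEntry (q g p : String) : PySem.Dict String String :=
  ((PySem.Dict.empty.insert "qualysapi" q).insert "gateway" g).insert "pod" p

-- transliteration of get_platform_identifier_dict: successive inserts into an empty dict
def get_platform_identifier_dict : PySem.Dict String (PySem.Dict String String) :=
  (((((((((((((PySem.Dict.empty.insert
    "_" (pvEntry "qualysapi.qualys.com" "gateway.qg1.apps.qualys.com" "US_01")).insert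
    "2" (pvEntry "qualysapi.qg2.apps.qualys.com" "gateway.qg2.apps.qualys.com" "US_02")).insert
    "3" (pvEntry "qualysapi.qg3.apps.qualys.com" "gateway.qg3.apps.qualys.com" "US_03")).insert
    "6" (pvEntry "qualysapi.qg4.apps.qualys.com" "gateway.qg4.apps.qualys.com" "US_04")).insert
    "-" (pvEntry "qualysapi.qualys.eu" "gateway.qg1.apps.qualys.eu" "EU_01")).insert
    "5" (pvEntry "qualysapi.qg2.apps.qualys.eu" "gateway.qg2.apps.qualys.eu" "EU_02")).insert
    "!" (pvEntry "qualysapi.qg2.apps.qualys.eu" "gateway.qg2.apps.qualys.eu" "EU_02")).insert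
    "B" (pvEntry "qualysapi.qg3.apps.qualys.it" "gateway.qg3.apps.qualys.it" "EU_03")).insert
    "8" (pvEntry "qualysapi.qg1.apps.qualys.in" "gateway.qg1.apps.qualys.in" "IN_01")).insert
    "9" (pvEntry "qualysapi.qg1.apps.qualys.ca" "gateway.qg1.apps.qualys.ca" "CA_01")).insert
    "7" (pvEntry "qualysapi.qg1.apps.qualys.ae" "gateway.qg1.apps.qualys.eu" "AE_01")).insert
    "1" (pvEntry "qualysapi.qg1.apps.qualys.co.uk" "gateway.qg1.apps.qualys.co.uk" "UK_01")).insert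
    "4" (pvEntry "qualysapi.qg1.apps.qualys.com.au" "gateway.qg1.apps.qualys.com.au" "AU_01")).insert
    "A" (pvEntry "qualysapi.qg1.apps.qualysksa.com" "gateway.qg1.apps.qualysksa.com" "KSA_01")

-- A's loop: 'for key in platform_identifier_dict: …'; iterating the keys with their entries
-- (dict keys are unique, so iterating items is the same traversal as key-then-index)
def pvScanA (s : String) : List (String × PySem.Dict String String) → Option (List (String × String))
  | [] => none
  | (_, e) :: rest =>
    let platform_qualysapi_fqdn := e.getD "qualysapi" ""
    let platform_gateway_fqdn := e.getD "gateway" ""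
    if s == platform_qualysapi_fqdn then some e.items
    else if s == platform_gateway_fqdn then some e.items
    else pvScanA s rest

def get_platform_identification_with_fqdn (fqdn : String) : Option (List (String × String)) :=
  let qualys_fqdn := PySem.Str.strip fqdn
  pvScanA qualys_fqdn get_platform_identifier_dict.items

-- ===== PORT B =====
-- the module-level _PLATFORMS list of Source B
def pvPlatforms : List (PySem.Dict String String) :=
  [ pvEntry "qualysapi.qualys.com" "gateway.qg1.apps.qualys.com" "US_01",
    pvEntry "qualysapi.qg2.apps.qualys.com" "gateway.qg2.apps.qualys.com" "US_02",
    pvEntry "qualysapi.qg3.apps.qualys.com" "gateway.qg3.apps.qualys.com" "US_03",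
    pvEntry "qualysapi.qg4.apps.qualys.com" "gateway.qg4.apps.qualys.com" "US_04",
    pvEntry "qualysapi.qualys.eu" "gateway.qg1.apps.qualys.eu" "EU_01",
    pvEntry "qualysapi.qg2.apps.qualys.eu" "gateway.qg2.apps.qualys.eu" "EU_02",
    pvEntry "qualysapi.qg2.apps.qualys.eu" "gateway.qg2.apps.qualys.eu" "EU_02",
    pvEntry "qualysapi.qg3.apps.qualys.it" "gateway.qg3.apps.qualys.it" "EU_03",
    pvEntry "qualysapi.qg1.apps.qualys.in" "gateway.qg1.apps.qualys.in" "IN_01",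
    pvEntry "qualysapi.qg1.apps.qualys.ca" "gateway.qg1.apps.qualys.ca" "CA_01",
    pvEntry "qualysapi.qg1.apps.qualys.ae" "gateway.qg1.apps.qualys.eu" "AE_01",
    pvEntry "qualysapi.qg1.apps.qualys.co.uk" "gateway.qg1.apps.qualys.co.uk" "UK_01",
    pvEntry "qualysapi.qg1.apps.qualys.com.au" "gateway.qg1.apps.qualys.com.au" "AU_01",
    pvEntry "qualysapi.qg1.apps.qualysksa.com" "gateway.qg1.apps.qualysksa.com" "KSA_01" ]

-- the module-level _INDEX of Source B, built once with setdefault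
def pvIndex : PySem.Dict String (PySem.Dict String String) :=
  pvPlatforms.foldl
    (fun idx e =>
      (idx.setdefault (e.getD "qualysapi" "") e).setdefault (e.getD "gateway" "") e)
    PySem.Dict.empty

def get_platform_identification_with_fqdn_alt (fqdn : String) : Option (List (String × String)) :=
  (pvIndex.get? (PySem.Str.strip fqdn)).map (fun e => e.items)

-- ===== PRECONDITION & SPEC =====
def Spec_get_platform_identification_with_fqdn (fqdn : String) (out : Option (List (String × String))) : Prop := out = get_platform_identification_with_fqdn_alt fqdn
instance (fqdn : String) (out : Option (List (String × String))) : Decidable (Spec_get_platform_identification_with_fqdn fqdn out) := by unfold Spec_get_platform_identification_with_fqdn; infer_instance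

-- ===== CLAIM (what is proved, stated in full; the proofs are below) =====
def Claim_equal_get_platform_identification_with_fqdn : Prop := ∀ (fqdn : String), Dom_get_platform_identification_with_fqdn fqdn → Spec_get_platform_identification_with_fqdn fqdn (get_platform_identification_with_fqdn fqdn)

-- ===== LEMMAS AND PROOFS =====
-- both ports are the same function of the stripped fqdn
-- find? on a cons cell in if-form (shape converter for the proof below)
theorem pv_find?_cons {α : Type} (p : α → Bool) (a : α) (as : List α) :
    List.find? p (a :: as) = if p a then some a else List.find? p as := by
  cases hp : p a <;> simp [hp]

set_option maxRecDepth 8192 in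
set_option maxHeartbeats 2000000 in
theorem pv_main (s : String) :
    pvScanA s get_platform_identifier_dict.items = (pvIndex.get? s).map (fun e => e.items) := by
  have hA : get_platform_identifier_dict.items =
      [ ("_", pvEntry "qualysapi.qualys.com" "gateway.qg1.apps.qualys.com" "US_01"),
        ("2", pvEntry "qualysapi.qg2.apps.qualys.com" "gateway.qg2.apps.qualys.com" "US_02"),
        ("3", pvEntry "qualysapi.qg3.apps.qualys.com" "gateway.qg3.apps.qualys.com" "US_03"),
        ("6", pvEntry "qualysapi.qg4.apps.qualys.com" "gateway.qg4.apps.qualys.com" "US_04"),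
        ("-", pvEntry "qualysapi.qualys.eu" "gateway.qg1.apps.qualys.eu" "EU_01"),
        ("5", pvEntry "qualysapi.qg2.apps.qualys.eu" "gateway.qg2.apps.qualys.eu" "EU_02"),
        ("!", pvEntry "qualysapi.qg2.apps.qualys.eu" "gateway.qg2.apps.qualys.eu" "EU_02"),
        ("B", pvEntry "qualysapi.qg3.apps.qualys.it" "gateway.qg3.apps.qualys.it" "EU_03"),
        ("8", pvEntry "qualysapi.qg1.apps.qualys.in" "gateway.qg1.apps.qualys.in" "IN_01"),
        ("9", pvEntry "qualysapi.qg1.apps.qualys.ca" "gateway.qg1.apps.qualys.ca" "CA_01"),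
        ("7", pvEntry "qualysapi.qg1.apps.qualys.ae" "gateway.qg1.apps.qualys.eu" "AE_01"),
        ("1", pvEntry "qualysapi.qg1.apps.qualys.co.uk" "gateway.qg1.apps.qualys.co.uk" "UK_01"),
        ("4", pvEntry "qualysapi.qg1.apps.qualys.com.au" "gateway.qg1.apps.qualys.com.au" "AU_01"),
        ("A", pvEntry "qualysapi.qg1.apps.qualysksa.com" "gateway.qg1.apps.qualysksa.com" "KSA_01") ] := by rfl
  have hI : pvIndex.items =
      [ ("qualysapi.qualys.com", pvEntry "qualysapi.qualys.com" "gateway.qg1.apps.qualys.com" "US_01"),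
        ("gateway.qg1.apps.qualys.com", pvEntry "qualysapi.qualys.com" "gateway.qg1.apps.qualys.com" "US_01"),
        ("qualysapi.qg2.apps.qualys.com", pvEntry "qualysapi.qg2.apps.qualys.com" "gateway.qg2.apps.qualys.com" "US_02"),
        ("gateway.qg2.apps.qualys.com", pvEntry "qualysapi.qg2.apps.qualys.com" "gateway.qg2.apps.qualys.com" "US_02"),
        ("qualysapi.qg3.apps.qualys.com", pvEntry "qualysapi.qg3.apps.qualys.com" "gateway.qg3.apps.qualys.com" "US_03"),
        ("gateway.qg3.apps.qualys.com", pvEntry "qualysapi.qg3.apps.qualys.com" "gateway.qg3.apps.qualys.com" "US_03"),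
        ("qualysapi.qg4.apps.qualys.com", pvEntry "qualysapi.qg4.apps.qualys.com" "gateway.qg4.apps.qualys.com" "US_04"),
        ("gateway.qg4.apps.qualys.com", pvEntry "qualysapi.qg4.apps.qualys.com" "gateway.qg4.apps.qualys.com" "US_04"),
        ("qualysapi.qualys.eu", pvEntry "qualysapi.qualys.eu" "gateway.qg1.apps.qualys.eu" "EU_01"),
        ("gateway.qg1.apps.qualys.eu", pvEntry "qualysapi.qualys.eu" "gateway.qg1.apps.qualys.eu" "EU_01"),
        ("qualysapi.qg2.apps.qualys.eu", pvEntry "qualysapi.qg2.apps.qualys.eu" "gateway.qg2.apps.qualys.eu" "EU_02"),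
        ("gateway.qg2.apps.qualys.eu", pvEntry "qualysapi.qg2.apps.qualys.eu" "gateway.qg2.apps.qualys.eu" "EU_02"),
        ("qualysapi.qg3.apps.qualys.it", pvEntry "qualysapi.qg3.apps.qualys.it" "gateway.qg3.apps.qualys.it" "EU_03"),
        ("gateway.qg3.apps.qualys.it", pvEntry "qualysapi.qg3.apps.qualys.it" "gateway.qg3.apps.qualys.it" "EU_03"),
        ("qualysapi.qg1.apps.qualys.in", pvEntry "qualysapi.qg1.apps.qualys.in" "gateway.qg1.apps.qualys.in" "IN_01"),
        ("gateway.qg1.apps.qualys.in", pvEntry "qualysapi.qg1.apps.qualys.in" "gateway.qg1.apps.qualys.in" "IN_01"),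
        ("qualysapi.qg1.apps.qualys.ca", pvEntry "qualysapi.qg1.apps.qualys.ca" "gateway.qg1.apps.qualys.ca" "CA_01"),
        ("gateway.qg1.apps.qualys.ca", pvEntry "qualysapi.qg1.apps.qualys.ca" "gateway.qg1.apps.qualys.ca" "CA_01"),
        ("qualysapi.qg1.apps.qualys.ae", pvEntry "qualysapi.qg1.apps.qualys.ae" "gateway.qg1.apps.qualys.eu" "AE_01"),
        ("qualysapi.qg1.apps.qualys.co.uk", pvEntry "qualysapi.qg1.apps.qualys.co.uk" "gateway.qg1.apps.qualys.co.uk" "UK_01"),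
        ("gateway.qg1.apps.qualys.co.uk", pvEntry "qualysapi.qg1.apps.qualys.co.uk" "gateway.qg1.apps.qualys.co.uk" "UK_01"),
        ("qualysapi.qg1.apps.qualys.com.au", pvEntry "qualysapi.qg1.apps.qualys.com.au" "gateway.qg1.apps.qualys.com.au" "AU_01"),
        ("gateway.qg1.apps.qualys.com.au", pvEntry "qualysapi.qg1.apps.qualys.com.au" "gateway.qg1.apps.qualys.com.au" "AU_01"),
        ("qualysapi.qg1.apps.qualysksa.com", pvEntry "qualysapi.qg1.apps.qualysksa.com" "gateway.qg1.apps.qualysksa.com" "KSA_01"),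
        ("gateway.qg1.apps.qualysksa.com", pvEntry "qualysapi.qg1.apps.qualysksa.com" "gateway.qg1.apps.qualysksa.com" "KSA_01") ] := by rfl
  have hgq : ∀ q g p : String, (pvEntry q g p).getD "qualysapi" "" = q := fun q g p => rfl
  have hgg : ∀ q g p : String, (pvEntry q g p).getD "gateway" "" = g := fun q g p => rfl
  have hor : ∀ k : String, (s == k) = (k == s) := fun k => by simp [eq_comm]
  rw [hA]
  simp only [pvScanA, hgq, hgg, hor]
  simp only [PySem.Dict.get?, hI, pv_find?_cons]
  simp only [apply_ite (Option.map (fun x : String × PySem.Dict String String => x.2)),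
    Option.map_some, List.find?_nil, Option.map_none]
  simp only [apply_ite (Option.map (fun e : PySem.Dict String String => e.items)),
    Option.map_some, Option.map_none]
  generalize (pvEntry "qualysapi.qualys.com" "gateway.qg1.apps.qualys.com" "US_01").items = E0
  generalize (pvEntry "qualysapi.qg2.apps.qualys.com" "gateway.qg2.apps.qualys.com" "US_02").items = E1
  generalize (pvEntry "qualysapi.qg3.apps.qualys.com" "gateway.qg3.apps.qualys.com" "US_03").items = E2
  generalize (pvEntry "qualysapi.qg4.apps.qualys.com" "gateway.qg4.apps.qualys.com" "US_04").items = E3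
  generalize (pvEntry "qualysapi.qualys.eu" "gateway.qg1.apps.qualys.eu" "EU_01").items = E4
  generalize (pvEntry "qualysapi.qg2.apps.qualys.eu" "gateway.qg2.apps.qualys.eu" "EU_02").items = E5
  generalize (pvEntry "qualysapi.qg2.apps.qualys.eu" "gateway.qg2.apps.qualys.eu" "EU_02").items = E6
  generalize (pvEntry "qualysapi.qg3.apps.qualys.it" "gateway.qg3.apps.qualys.it" "EU_03").items = E7
  generalize (pvEntry "qualysapi.qg1.apps.qualys.in" "gateway.qg1.apps.qualys.in" "IN_01").items = E8
  generalize (pvEntry "qualysapi.qg1.apps.qualys.ca" "gateway.qg1.apps.qualys.ca" "CA_01").items = E9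
  generalize (pvEntry "qualysapi.qg1.apps.qualys.ae" "gateway.qg1.apps.qualys.eu" "AE_01").items = E10
  generalize (pvEntry "qualysapi.qg1.apps.qualys.co.uk" "gateway.qg1.apps.qualys.co.uk" "UK_01").items = E11
  generalize (pvEntry "qualysapi.qg1.apps.qualys.com.au" "gateway.qg1.apps.qualys.com.au" "AU_01").items = E12
  generalize (pvEntry "qualysapi.qg1.apps.qualysksa.com" "gateway.qg1.apps.qualysksa.com" "KSA_01").items = E13
  generalize ("qualysapi.qualys.com" == s) = c0
  generalize ("gateway.qg1.apps.qualys.com" == s) = c1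
  generalize ("qualysapi.qg2.apps.qualys.com" == s) = c2
  generalize ("gateway.qg2.apps.qualys.com" == s) = c3
  generalize ("qualysapi.qg3.apps.qualys.com" == s) = c4
  generalize ("gateway.qg3.apps.qualys.com" == s) = c5
  generalize ("qualysapi.qg4.apps.qualys.com" == s) = c6
  generalize ("gateway.qg4.apps.qualys.com" == s) = c7
  generalize ("qualysapi.qualys.eu" == s) = c8
  generalize ("gateway.qg1.apps.qualys.eu" == s) = c9
  generalize ("qualysapi.qg2.apps.qualys.eu" == s) = c10
  generalize ("gateway.qg2.apps.qualys.eu" == s) = c11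
  generalize ("qualysapi.qg3.apps.qualys.it" == s) = c12
  generalize ("gateway.qg3.apps.qualys.it" == s) = c13
  generalize ("qualysapi.qg1.apps.qualys.in" == s) = c14
  generalize ("gateway.qg1.apps.qualys.in" == s) = c15
  generalize ("qualysapi.qg1.apps.qualys.ca" == s) = c16
  generalize ("gateway.qg1.apps.qualys.ca" == s) = c17
  generalize ("qualysapi.qg1.apps.qualys.ae" == s) = c18
  generalize ("qualysapi.qg1.apps.qualys.co.uk" == s) = c19
  generalize ("gateway.qg1.apps.qualys.co.uk" == s) = c20
  generalize ("qualysapi.qg1.apps.qualys.com.au" == s) = c21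
  generalize ("gateway.qg1.apps.qualys.com.au" == s) = c22
  generalize ("qualysapi.qg1.apps.qualysksa.com" == s) = c23
  generalize ("gateway.qg1.apps.qualysksa.com" == s) = c24
  by_cases h0 : c0 = true
  · simp [h0]
  by_cases h1 : c1 = true
  · simp [h0, h1]
  by_cases h2 : c2 = true
  · simp [h0, h1, h2]
  by_cases h3 : c3 = true
  · simp [h0, h1, h2, h3]
  by_cases h4 : c4 = true
  · simp [h0, h1, h2, h3, h4]
  by_cases h5 : c5 = true
  · simp [h0, h1, h2, h3, h4, h5]
  by_cases h6 : c6 = true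
  · simp [h0, h1, h2, h3, h4, h5, h6]
  by_cases h7 : c7 = true
  · simp [h0, h1, h2, h3, h4, h5, h6, h7]
  by_cases h8 : c8 = true
  · simp [h0, h1, h2, h3, h4, h5, h6, h7, h8]
  by_cases h9 : c9 = true
  · simp [h0, h1, h2, h3, h4, h5, h6, h7, h8, h9]
  by_cases h10 : c10 = true
  · simp [h0, h1, h2, h3, h4, h5, h6, h7, h8, h9, h10]
  by_cases h11 : c11 = true
  · simp [h0, h1, h2, h3, h4, h5, h6, h7, h8, h9, h10, h11]
  by_cases h12 : c12 = true
  · simp [h0, h1, h2, h3, h4, h5, h6, h7, h8, h9, h10, h11, h12]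
  by_cases h13 : c13 = true
  · simp [h0, h1, h2, h3, h4, h5, h6, h7, h8, h9, h10, h11, h12, h13]
  by_cases h14 : c14 = true
  · simp [h0, h1, h2, h3, h4, h5, h6, h7, h8, h9, h10, h11, h12, h13, h14]
  by_cases h15 : c15 = true
  · simp [h0, h1, h2, h3, h4, h5, h6, h7, h8, h9, h10, h11, h12, h13, h14, h15]
  by_cases h16 : c16 = true
  · simp [h0, h1, h2, h3, h4, h5, h6, h7, h8, h9, h10, h11, h12, h13, h14, h15, h16]
  by_cases h17 : c17 = true
  · simp [h0, h1, h2, h3, h4, h5, h6, h7, h8, h9, h10, h11, h12, h13, h14, h15, h16, h17]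
  by_cases h18 : c18 = true
  · simp [h0, h1, h2, h3, h4, h5, h6, h7, h8, h9, h10, h11, h12, h13, h14, h15, h16, h17, h18]
  by_cases h19 : c19 = true
  · simp [h0, h1, h2, h3, h4, h5, h6, h7, h8, h9, h10, h11, h12, h13, h14, h15, h16, h17, h18, h19]
  by_cases h20 : c20 = true
  · simp [h0, h1, h2, h3, h4, h5, h6, h7, h8, h9, h10, h11, h12, h13, h14, h15, h16, h17, h18, h19, h20]
  by_cases h21 : c21 = true
  · simp [h0, h1, h2, h3, h4, h5, h6, h7, h8, h9, h10, h11, h12, h13, h14, h15, h16, h17, h18, h19, h20, h21]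
  by_cases h22 : c22 = true
  · simp [h0, h1, h2, h3, h4, h5, h6, h7, h8, h9, h10, h11, h12, h13, h14, h15, h16, h17, h18, h19, h20, h21, h22]
  by_cases h23 : c23 = true
  · simp [h0, h1, h2, h3, h4, h5, h6, h7, h8, h9, h10, h11, h12, h13, h14, h15, h16, h17, h18, h19, h20, h21, h22, h23]
  by_cases h24 : c24 = true
  · simp [h0, h1, h2, h3, h4, h5, h6, h7, h8, h9, h10, h11, h12, h13, h14, h15, h16, h17, h18, h19, h20, h21, h22, h23, h24]
  simp [h0, h1, h2, h3, h4, h5, h6, h7, h8, h9, h10, h11, h12, h13, h14, h15, h16, h17, h18, h19, h20, h21, h22, h23, h24]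
-- ===== VERDICT (by name: the statement is the Claim_ definition above) =====
theorem get_platform_identification_with_fqdn_spec : Claim_equal_get_platform_identification_with_fqdn := by
  intro fqdn _
  unfold Spec_get_platform_identification_with_fqdn
  unfold get_platform_identification_with_fqdn get_platform_identification_with_fqdn_alt
  exact pv_main (PySem.Str.strip fqdn)
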